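-- pv_equiv track=rewrite | github.com/u5n/u5n.github.io | algods/plib/comb_prob/itertools.py | k_groups
-- ===== SOURCE A (Python) =====
-- def k_groups(n, k):
--     """
--     des:
--         divide [0,n-1] into k unlabeled groups
--         related: the "submask" trick of bitmask can divide [0,n-1] into 3 labeled groups in O(3^n)
--     time: second stirling number; ~O(k^n)
--     """
--     ret = []
--     def dfs(i, grps, empty):
--         if n-i == empty:
--             if i==n:
--                 ret.append(grps)
--             else:
--                 ret.append(grps[:i] + tuple((i,) for i in range(i,n)))
--             return
--         for grps_p, grp in enumerate(grps):
--             if len(grp)==0: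
--                 dfs(i+1, grps[:grps_p]+((i,),)+grps[grps_p+1:], empty-1)
--                 break
--             else:
--                 dfs(i+1, grps[:grps_p]+(grp+(i,),)+grps[grps_p+1:], empty)
--     dfs(0, (tuple(),)*k, k)
--     return ret
-- ===== SOURCE B (Python) =====
-- def k_groups(n, k):
--     # Iterative level-synchronous enumeration: a worklist of partial states replaces
--     # the recursion. A state is the k-tuple of groups under construction; it is
--     # finalized as soon as each remaining element must open its own group.
--     def settle(i, grps, need):
--         # need = groups still to be opened
--         if n - i == need:
--             return ('done', grps[:i] + tuple((m,) for m in range(i, n)))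
--         return ('todo', grps, need)
--
--     states = [settle(0, ((),) * k, k)]
--     for i in range(n):
--         nxt = []
--         for st in states:
--             if st[0] == 'done':
--                 nxt.append(st)
--                 continue
--             _, grps, need = st
--             for p, grp in enumerate(grps):
--                 if grp:
--                     nxt.append(settle(i + 1, grps[:p] + (grp + (i,),) + grps[p + 1:], need))
--                 else:
--                     nxt.append(settle(i + 1, grps[:p] + ((i,),) + grps[p + 1:], need - 1))
--                     break
--         states = nxt
--     return [st[1] for st in states if st[0] == 'done']
-- ===== Notes on version B (the rewrite author's own statement) =====
-- stated objective: alternative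
-- what changed: Replaces A's DFS recursion (closure appending to ret, recursing per element) by an iterative level-synchronous worklist of partial states over the same k-slot group tuples, finalizing a state at creation as soon as each remaining element must open its own group; Pre_ excludes only k > max(n,0), where A raises RecursionError (B returns [] there).
import Mathlib
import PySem

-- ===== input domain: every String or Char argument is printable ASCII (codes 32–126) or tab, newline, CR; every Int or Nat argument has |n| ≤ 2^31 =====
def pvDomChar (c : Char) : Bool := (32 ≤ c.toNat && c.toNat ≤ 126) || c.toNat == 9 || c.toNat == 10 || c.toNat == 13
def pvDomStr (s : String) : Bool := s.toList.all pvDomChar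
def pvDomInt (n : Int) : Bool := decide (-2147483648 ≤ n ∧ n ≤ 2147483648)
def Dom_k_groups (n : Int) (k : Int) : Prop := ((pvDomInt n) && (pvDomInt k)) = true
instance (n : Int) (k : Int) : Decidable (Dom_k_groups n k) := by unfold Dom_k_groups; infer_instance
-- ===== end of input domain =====

-- B replaces A's DFS recursion by an iterative level-synchronous worklist of partial states
-- over the same k-slot group tuples (alternative algorithm, same output).

-- ===== PORT A =====
-- inner 'for grps_p, grp in enumerate(grps)' loop of dfs (p = grps_p, walking the suffix of grps)
def dfsLoopA (recf : Int → List (List Int) → Int → List (List (List Int)))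
    (i : Int) (grps : List (List Int)) (empty : Int) :
    Nat → List (List Int) → List (List (List Int))
  | _, [] => []
  | p, grp :: rest =>
      if grp.length = 0 then
        -- dfs(i+1, grps[:p]+((i,),)+grps[p+1:], empty-1); break
        recf (i + 1) (grps.take p ++ [[i]] ++ grps.drop (p + 1)) (empty - 1)
      else
        -- dfs(i+1, grps[:p]+((grp+(i,)),)+grps[p+1:], empty) and continue the loop
        recf (i + 1) (grps.take p ++ [grp ++ [i]] ++ grps.drop (p + 1)) empty
          ++ dfsLoopA recf i grps empty (p + 1) rest

-- dfs; fuel bounds the recursion depth (n+1 suffices on Pre_, where Python's dfs terminates)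
def dfsA (n : Int) : Nat → Int → List (List Int) → Int → List (List (List Int))
  | 0, _, _, _ => []
  | fuel + 1, i, grps, empty =>
      if n - i = empty then
        if i = n then [grps]
        else [grps.take i.toNat ++ (PySem.List.pyRange i n 1).map (fun m => [m])]
      else dfsLoopA (dfsA n fuel) i grps empty 0 grps

def k_groups (n : Int) (k : Int) : List (List (List Int)) :=
  dfsA n (n.toNat + 1) 0 (List.replicate k.toNat []) k

-- ===== PORT B =====
-- settle(i, grps, need): finalize the state if each remaining element must open its own group
def settleB (n i : Int) (grps : List (List Int)) (need : Int) :
    (List (List Int)) ⊕ (List (List Int) × Int) :=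
  if n - i = need then
    Sum.inl (grps.take i.toNat ++ (PySem.List.pyRange i n 1).map (fun m => [m]))
  else Sum.inr (grps, need)

-- the 'for p, grp in enumerate(grps)' placement loop of one todo state
def kidsB (n i : Int) (grps : List (List Int)) (need : Int) :
    Nat → List (List Int) → List ((List (List Int)) ⊕ (List (List Int) × Int))
  | _, [] => []
  | p, grp :: rest =>
      if grp = [] then
        [settleB n (i + 1) (grps.take p ++ [[i]] ++ grps.drop (p + 1)) (need - 1)]
      else
        settleB n (i + 1) (grps.take p ++ [grp ++ [i]] ++ grps.drop (p + 1)) need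
          :: kidsB n i grps need (p + 1) rest

-- one level: expand every todo state, carry finalized states through
def stepB (n i : Int) (states : List ((List (List Int)) ⊕ (List (List Int) × Int))) :
    List ((List (List Int)) ⊕ (List (List Int) × Int)) :=
  states.flatMap (fun st =>
    match st with
    | Sum.inl o => [Sum.inl o]
    | Sum.inr (grps, need) => kidsB n i grps need 0 grps)

def k_groups_alt (n : Int) (k : Int) : List (List (List Int)) :=
  ((PySem.List.pyRange 0 n 1).foldl (fun ss i => stepB n i ss)
      [settleB n 0 (List.replicate k.toNat []) k]).filterMap
    (fun st => match st with | Sum.inl o => some o | Sum.inr _ => none)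

-- ===== PRECONDITION & SPEC =====
-- Pre_ excludes exactly k > max(n,0), where A's dfs recurses without bound (RecursionError).
def Pre_k_groups (n : Int) (k : Int) : Prop := k ≤ 0 ∨ k ≤ n
instance (n : Int) (k : Int) : Decidable (Pre_k_groups n k) := by unfold Pre_k_groups; infer_instance
def pvWitness_k_groups : Int × Int := (3, 2)

def Spec_k_groups (n : Int) (k : Int) (out : List (List (List Int))) : Prop := out = k_groups_alt n k
instance (n : Int) (k : Int) (out : List (List (List Int))) : Decidable (Spec_k_groups n k out) := by unfold Spec_k_groups; infer_instance

-- ===== CLAIM (what is proved, stated in full; the proofs are below) =====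
def Claim_equal_k_groups : Prop := ∀ (n : Int) (k : Int), Dom_k_groups n k → Pre_k_groups n k → Spec_k_groups n k (k_groups n k)

-- ===== LEMMAS AND PROOFS =====

-- the argument list of the children A's dfs spawns from state (i, grps, need), p walking grps
def dfsChildren (i : Int) (grps : List (List Int)) (need : Int) :
    Nat → List (List Int) → List (List (List Int) × Int)
  | _, [] => []
  | p, grp :: rest =>
      if grp = [] then [(grps.take p ++ [[i]] ++ grps.drop (p + 1), need - 1)]
      else (grps.take p ++ [grp ++ [i]] ++ grps.drop (p + 1), need)
            :: dfsChildren i grps need (p + 1) rest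

theorem dfsLoopA_eq_children (recf : Int → List (List Int) → Int → List (List (List Int)))
    (i : Int) (grps : List (List Int)) (need : Int) :
    ∀ (suf : List (List Int)) (p : Nat),
      dfsLoopA recf i grps need p suf
        = (dfsChildren i grps need p suf).flatMap (fun c => recf (i + 1) c.1 c.2) := by
  intro suf
  induction suf with
  | nil => intro p; simp [dfsLoopA, dfsChildren]
  | cons g rest ih =>
      intro p
      by_cases hg : g = []
      · simp [dfsLoopA, dfsChildren, hg]
      · have hlen : ¬ g.length = 0 := by simpa [List.length_eq_zero_iff] using hg
        simp only [dfsLoopA, dfsChildren, if_neg hlen, if_neg hg, List.flatMap_cons]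
        rw [ih]

theorem kidsB_eq_children (n i : Int) (grps : List (List Int)) (need : Int) :
    ∀ (suf : List (List Int)) (p : Nat),
      kidsB n i grps need p suf
        = (dfsChildren i grps need p suf).map (fun c => settleB n (i + 1) c.1 c.2) := by
  intro suf
  induction suf with
  | nil => intro p; simp [kidsB, dfsChildren]
  | cons g rest ih =>
      intro p
      by_cases hg : g = []
      · simp [kidsB, dfsChildren, hg]
      · simp only [kidsB, dfsChildren, if_neg hg, List.map_cons]
        rw [ih]

-- invariants of the spawned children
theorem dfsChildren_mem (i : Int) (grps : List (List Int)) (need : Int) :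
    ∀ (suf : List (List Int)) (p : Nat), grps.drop p = suf →
    ∀ c ∈ dfsChildren i grps need p suf,
      c.1.length = grps.length ∧ need - 1 ≤ c.2 ∧ c.2 ≤ need ∧
      (c.1.countP (fun g => g.isEmpty) : Int) =
        (grps.countP (fun g => g.isEmpty) : Int) + c.2 - need := by
  intro suf
  induction suf with
  | nil => intro p _ c hc; simp [dfsChildren] at hc
  | cons g rest ih =>
      intro p hdrop c hc
      have hplen : p < grps.length := by
        by_contra h
        rw [List.drop_eq_nil_of_le (by omega)] at hdrop
        exact List.cons_ne_nil _ _ hdrop.symm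
      have hsplit : grps = grps.take p ++ g :: rest := by
        conv_lhs => rw [← List.take_append_drop p grps, hdrop]
      have hdrop1 : grps.drop (p + 1) = rest := by
        have : grps.drop (p + 1) = (grps.drop p).drop 1 := by
          rw [List.drop_drop]
        rw [this, hdrop]; rfl
      have htlen : (grps.take p).length = p := List.length_take_of_le (by omega)
      by_cases hg : g = []
      · simp only [dfsChildren, if_pos hg, List.mem_singleton] at hc
        subst hc
        refine ⟨?_, by omega, by omega, ?_⟩
        · conv_rhs => rw [hsplit]
          simp [htlen, hdrop1]
        · conv_rhs => rw [hsplit]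
          rw [hdrop1]
          simp [List.countP_append, hg]
          omega
      · simp only [dfsChildren, if_neg hg, List.mem_cons] at hc
        rcases hc with hc | hc
        · subst hc
          refine ⟨?_, by omega, by omega, ?_⟩
          · conv_rhs => rw [hsplit]
            simp [htlen, hdrop1]
          · conv_rhs => rw [hsplit]
            rw [hdrop1]
            have h1 : (g ++ [i]).isEmpty = false := by simp
            have h2 : g.isEmpty = false := by simpa [List.isEmpty_iff] using hg
            simp [List.countP_append, h1, h2]
        · exact ih (p + 1) hdrop1 c hc

theorem stepB_nil (n i : Int) : stepB n i [] = [] := rfl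

theorem stepB_append (n i : Int) (xs ys : List ((List (List Int)) ⊕ (List (List Int) × Int))) :
    stepB n i (xs ++ ys) = stepB n i xs ++ stepB n i ys := by
  simp [stepB]

theorem foldl_stepB_nil (n : Int) (l : List Int) :
    l.foldl (fun ss i => stepB n i ss) [] = [] := by
  induction l with
  | nil => rfl
  | cons a l ih => simpa [stepB_nil] using ih

theorem foldl_stepB_append (n : Int) (l : List Int)
    (xs ys : List ((List (List Int)) ⊕ (List (List Int) × Int))) :
    l.foldl (fun ss i => stepB n i ss) (xs ++ ys)
      = l.foldl (fun ss i => stepB n i ss) xs ++ l.foldl (fun ss i => stepB n i ss) ys := by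
  induction l generalizing xs ys with
  | nil => rfl
  | cons a l ih => simp only [List.foldl_cons, stepB_append]; exact ih _ _

theorem foldl_stepB_frozen (n : Int) (l : List Int) (o : List (List Int)) :
    l.foldl (fun ss i => stepB n i ss) [Sum.inl o] = [Sum.inl o] := by
  induction l with
  | nil => rfl
  | cons a l ih => simpa [stepB] using ih

theorem foldl_stepB_flatMap (n : Int) (l : List Int)
    (ss : List ((List (List Int)) ⊕ (List (List Int) × Int))) :
    l.foldl (fun st i => stepB n i st) ss
      = ss.flatMap (fun s => l.foldl (fun st i => stepB n i st) [s]) := by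
  induction ss with
  | nil => simp [foldl_stepB_nil]
  | cons s t ih =>
      have h : s :: t = [s] ++ t := rfl
      rw [h, foldl_stepB_append, ih]
      simp

theorem flatMap_congr_mem {α β : Type} {l : List α} {f g : α → List β}
    (h : ∀ a ∈ l, f a = g a) : l.flatMap f = l.flatMap g := by
  induction l with
  | nil => rfl
  | cons a l ih =>
      simp only [List.flatMap_cons]
      rw [h a (by simp), ih (fun a ha => h a (by simp [ha]))]

theorem filterMap_flatMap' {α β γ : Type} (l : List α) (f : α → List β) (g : β → Option γ) :
    (l.flatMap f).filterMap g = l.flatMap (fun a => (f a).filterMap g) := by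
  induction l with
  | nil => rfl
  | cons a l ih => simp [List.flatMap_cons, List.filterMap_append, ih]

def outOfB : (List (List Int)) ⊕ (List (List Int) × Int) → Option (List (List Int))
  | Sum.inl o => some o
  | Sum.inr _ => none

theorem main_lemma (n : Int) : ∀ (d fuel : Nat) (i : Int) (grps : List (List Int)) (need : Int),
    (n - i).toNat = d → d < fuel → 0 ≤ i → i ≤ n → (grps.length : Int) ≤ n →
    need ≤ n - i → (grps.countP (fun g => g.isEmpty) : Int) = need →
    dfsA n fuel i grps need
      = ((PySem.List.pyRange i n 1).foldl (fun ss x => stepB n x ss)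
          [settleB n i grps need]).filterMap outOfB := by
  intro d
  induction d using Nat.strong_induction_on with
  | _ d IH =>
    intro fuel i grps need hd hfuel h0i hin hlen hneed hcount
    match fuel with
    | 0 => omega
    | f + 1 =>
      by_cases h1 : n - i = need
      · -- finalize
        rw [settleB, if_pos h1, foldl_stepB_frozen]
        simp only [dfsA, if_pos h1, List.filterMap]
        by_cases h2 : i = n
        · subst h2
          rw [if_pos rfl, PySem.List.pyRange_one_eq_nil (le_refl i)]
          have : grps.take i.toNat = grps := List.take_of_length_le (by omega)
          simp [outOfB, this]
        · rw [if_neg h2]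
          simp [outOfB]
      · -- expand
        have hcnt0 : 0 ≤ need := by
          rw [← hcount]; positivity
        have hilt : i < n := by omega
        simp only [dfsA, if_neg h1]
        rw [settleB, if_neg h1, PySem.List.pyRange_one_cons hilt]
        simp only [List.foldl_cons]
        have hstep : stepB n i [Sum.inr (grps, need)] = kidsB n i grps need 0 grps := by
          simp [stepB]
        rw [hstep, kidsB_eq_children, foldl_stepB_flatMap, List.flatMap_map,
            filterMap_flatMap', dfsLoopA_eq_children _ _ _ _ grps 0]
        apply flatMap_congr_mem
        intro c hc
        obtain ⟨hclen, hc1, hc2, hccnt⟩ :=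
          dfsChildren_mem i grps need grps 0 (List.drop_zero) c hc
        exact IH (d - 1) (by omega) f (i + 1) c.1 c.2 (by omega) (by omega) (by omega)
          (by omega) (by omega) (by omega) (by omega)

-- ===== VERDICT (by name: the statement is the Claim_ definition above) =====
theorem k_groups_spec : Claim_equal_k_groups := by
  intro n k _ hpre
  unfold Spec_k_groups k_groups k_groups_alt
  by_cases hk : 0 < k
  · have hkn : k ≤ n := by
      rcases hpre with h | h
      · omega
      · exact h
    have h0k : 0 ≤ k := le_of_lt hk
    have h0n : 0 ≤ n := le_trans h0k hkn
    have := main_lemma n n.toNat (n.toNat + 1) 0 (List.replicate k.toNat []) k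
        (by omega) (by omega) (le_refl 0) h0n (by simp; omega) (by omega)
        (by rw [List.countP_replicate]; simp; omega)
    simpa [outOfB] using this
  · -- k < 0: zero slots; A returns [()] iff n = k, else []
    have hrep : k.toNat = 0 := by omega
    simp only [hrep, List.replicate_zero]
    by_cases hnk : n = k
    · rw [settleB, if_pos (show n - 0 = k by omega),
          PySem.List.pyRange_one_eq_nil (show n ≤ 0 by omega)]
      by_cases h0 : (0 : Int) = n
      · simp only [dfsA, if_pos (show n - 0 = k by omega), if_pos h0]
        simp
      · simp only [dfsA, if_pos (show n - 0 = k by omega), if_neg h0]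
        rw [PySem.List.pyRange_one_eq_nil (show n ≤ 0 by omega)]
        simp
    · rw [settleB, if_neg (show ¬ n - 0 = k by omega)]
      simp only [dfsA, if_neg (show ¬ n - 0 = k by omega)]
      by_cases hn : 0 < n
      · rw [PySem.List.pyRange_one_cons hn]
        simp only [List.foldl_cons]
        have hstep : stepB n 0 [Sum.inr (([] : List (List Int)), k)] = [] := by
          simp [stepB, kidsB]
        rw [hstep, foldl_stepB_nil]
        simp [dfsLoopA]
      · rw [PySem.List.pyRange_one_eq_nil (by omega)]
        simp [dfsLoopA]
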